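-- pv_equiv track=rewrite | github.com/aMarkSnyder/AdventOfCode2023 | Day12/hot_springs.py | find_broken_sequences
-- ===== SOURCE A (Python) =====
-- def find_broken_sequences(row):
--     sequences = []
--     sequence = 0
--     for char in row:
--         if char == '?':
--             break
--         elif char == '#':
--             sequence += 1
--         else:
--             if sequence:
--                 sequences.append(sequence)
--                 sequence = 0
--     if sequence:
--         sequences.append(sequence)
--     return tuple(sequences)
-- ===== SOURCE B (Python) =====
-- def find_broken_sequences(row):
--     cut = row.find('?')
--     prefix = row if cut == -1 else row[:cut]
--     masked = ''.join(c if c == '#' else ' ' for c in prefix)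
--     return tuple(len(run) for run in masked.split())
-- ===== Notes on version B (the rewrite author's own statement) =====
-- stated objective: idiomatic
-- what changed: Replaces the stateful character loop with run-counter and break by a truncate-at-first-'?' slice, a mask of non-'#' characters to spaces, and a whitespace split whose piece lengths are the runs.
import Mathlib
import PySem

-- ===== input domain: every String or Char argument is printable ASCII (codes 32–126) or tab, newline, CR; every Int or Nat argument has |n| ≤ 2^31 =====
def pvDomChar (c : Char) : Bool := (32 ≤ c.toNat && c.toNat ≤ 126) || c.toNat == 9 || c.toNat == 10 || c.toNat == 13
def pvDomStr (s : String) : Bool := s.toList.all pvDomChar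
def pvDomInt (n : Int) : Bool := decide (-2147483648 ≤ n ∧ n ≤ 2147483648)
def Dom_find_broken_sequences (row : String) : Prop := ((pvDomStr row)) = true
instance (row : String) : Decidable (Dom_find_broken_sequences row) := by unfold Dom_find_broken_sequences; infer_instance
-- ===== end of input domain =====

-- B replaces A's stateful run-counting loop (with break) by truncate-at-first-'?', mask, whitespace split (idiomatic; same cost).

-- ===== PORT A =====
-- A's for-loop with break, carrying (sequences, sequence); the '?' branch jumps to the final 'if sequence' check.
def findBrokenLoop : List Char → List Int → Int → List Int
  | [], seqs, seq => if seq ≠ 0 then seqs ++ [seq] else seqs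
  | c :: cs, seqs, seq =>
    if c = '?' then (if seq ≠ 0 then seqs ++ [seq] else seqs)
    else if c = '#' then findBrokenLoop cs seqs (seq + 1)
    else if seq ≠ 0 then findBrokenLoop cs (seqs ++ [seq]) 0
    else findBrokenLoop cs seqs seq

def find_broken_sequences (row : String) : List Int :=
  findBrokenLoop row.toList [] 0

-- ===== PORT B =====
def find_broken_sequences_alt (row : String) : List Int :=
  let s := row.toList
  let cut := PySem.Chars.find s ['?']
  let pre := if cut = -1 then s else PySem.List.slice s none (some cut)
  let masked := pre.map (fun c => if c = '#' then c else ' ')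
  (PySem.Chars.split₀ masked).map (fun r => (r.length : Int))

-- ===== PRECONDITION & SPEC =====
def Spec_find_broken_sequences (row : String) (out : List Int) : Prop := out = find_broken_sequences_alt row
instance (row : String) (out : List Int) : Decidable (Spec_find_broken_sequences row out) := by unfold Spec_find_broken_sequences; infer_instance

-- ===== CLAIM (what is proved, stated in full; the proofs are below) =====
def Claim_equal_find_broken_sequences : Prop := ∀ (row : String), Dom_find_broken_sequences row → Spec_find_broken_sequences row (find_broken_sequences row)

-- ===== LEMMAS AND PROOFS =====

-- A breaks at the first '?': the loop only sees the takeWhile-prefix.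
lemma findBrokenLoop_takeWhile (cs : List Char) (seqs : List Int) (seq : Int) :
    findBrokenLoop cs seqs seq = findBrokenLoop (cs.takeWhile (· ≠ '?')) seqs seq := by
  induction cs generalizing seqs seq with
  | nil => rfl
  | cons c cs ih =>
    by_cases hq : c = '?'
    · subst hq; simp [findBrokenLoop, List.takeWhile]
    · simp only [List.takeWhile]
      by_cases hh : c = '#'
      · simp [findBrokenLoop, hh, ih]
      · by_cases hs : seq ≠ 0 <;> simp [findBrokenLoop, hq, hh, hs, ih]

-- The prefix before the first '?', as B computes it, is the takeWhile-prefix.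
lemma singleton_prefix_iff_head? (l : List Char) (a : Char) : [a] <+: l ↔ l.head? = some a := by
  constructor
  · rintro ⟨t, rfl⟩; rfl
  · intro h
    cases l with
    | nil => simp at h
    | cons x xs => simp at h; subst h; exact ⟨xs, rfl⟩

lemma takeWhile_eq_take_of_first (s : List Char) (k : Nat)
    (h1 : s[k]? = some '?') (h2 : ∀ i < k, s[i]? ≠ some '?') :
    s.takeWhile (· ≠ '?') = s.take k := by
  induction s generalizing k with
  | nil => simp at h1
  | cons c cs ih =>
    cases k with
    | zero => simp at h1; simp [List.takeWhile, h1]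
    | succ k =>
      have hc : c ≠ '?' := by
        have := h2 0 (Nat.succ_pos k); simpa using this
      rw [List.takeWhile_cons_of_pos (by simp [hc]), List.take_succ_cons]
      congr 1
      exact ih k (by simpa using h1) (fun i hi => by
        have := h2 (i + 1) (by omega); simpa using this)

lemma prefix_is_takeWhile (s : List Char) :
    (if PySem.Chars.find s ['?'] = -1 then s else PySem.List.slice s none (some (PySem.Chars.find s ['?'])))
      = s.takeWhile (· ≠ '?') := by
  by_cases h : PySem.Chars.find s ['?'] = -1
  · have hnot : '?' ∉ s := by
      have := (PySem.Chars.find_eq_neg_one_iff s ['?']).mp h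
      intro hm; exact this ((List.singleton_infix_iff _ _).mpr hm)
    rw [if_pos h]
    exact (List.takeWhile_eq_self_iff.mpr (fun x hx => by
      have hx' : x ≠ '?' := fun he => hnot (he ▸ hx)
      simp [hx'])).symm
  · have hpos : 0 ≤ PySem.Chars.find s ['?'] := by
      have := PySem.Chars.neg_one_le_find s ['?']; omega
    obtain ⟨hpre, hmin⟩ := PySem.Chars.find_spec (s := s) (sub := ['?']) hpos
    rw [if_neg h, PySem.List.slice_to s hpos]
    refine (takeWhile_eq_take_of_first s (PySem.Chars.find s ['?']).toNat ?_ ?_).symm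
    · have := (singleton_prefix_iff_head? _ '?').mp hpre
      rwa [List.head?_drop] at this
    · intro i hi hcontra
      exact hmin i hi ((singleton_prefix_iff_head? _ '?').mpr (by rwa [List.head?_drop]))

-- Run lengths of '#' via the loop state ↔ split₀'s accumulators (cur = current word reversed, acc = words reversed).
lemma loop_eq_split₀_go (cs : List Char) (cur : List Char) (acc : List (List Char))
    (h : '?' ∉ cs) :
    findBrokenLoop cs (acc.reverse.map (fun r => (r.length : Int))) (cur.length : Int)
      = (PySem.Chars.split₀.go (cs.map (fun c => if c = '#' then c else ' ')) cur acc).map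
          (fun r => (r.length : Int)) := by
  induction cs generalizing cur acc with
  | nil =>
    by_cases hc : cur = []
    · subst hc; simp [findBrokenLoop, PySem.Chars.split₀.go]
    · have : cur.length ≠ 0 := by simpa using hc
      simp [findBrokenLoop, PySem.Chars.split₀.go, List.isEmpty_iff, hc, this]
  | cons c cs ih =>
    have hq : c ≠ '?' := fun he => h (he ▸ List.mem_cons_self)
    have h' : '?' ∉ cs := fun hm => h (List.mem_cons_of_mem _ hm)
    by_cases hh : c = '#'
    · subst hh
      have : PySem.Chars.isspace '#' = false := by decide
      simp only [List.map_cons, PySem.Chars.split₀.go, if_false, findBrokenLoop, hq]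
      have := ih (cur := '#' :: cur) (acc := acc) h'
      simpa [Int.add_comm] using this
    · have hsp : PySem.Chars.isspace ' ' = true := by decide
      by_cases hc : cur = []
      · subst hc
        simp only [List.map_cons, PySem.Chars.split₀.go, hsp, if_true,
          List.isEmpty_nil, findBrokenLoop, if_neg hq, if_neg hh]
        simpa using ih (cur := []) (acc := acc) h'
      · have hlen : (cur.length : Int) ≠ 0 := by simpa using hc
        simp only [List.map_cons, if_neg hh, PySem.Chars.split₀.go, hsp, if_true,
          List.isEmpty_iff, if_neg hc, findBrokenLoop, if_neg hq, if_pos hlen]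
        have := ih (cur := []) (acc := cur.reverse :: acc) h'
        simpa using this

-- ===== VERDICT (by name: the statement is the Claim_ definition above) =====
theorem find_broken_sequences_spec : Claim_equal_find_broken_sequences := by
  intro row _
  unfold Spec_find_broken_sequences find_broken_sequences find_broken_sequences_alt
  simp only []
  rw [prefix_is_takeWhile row.toList, findBrokenLoop_takeWhile]
  have hnot : '?' ∉ row.toList.takeWhile (· ≠ '?') := by
    intro hm
    have := List.mem_takeWhile_imp hm
    simp at this
  have := loop_eq_split₀_go (row.toList.takeWhile (· ≠ '?')) [] [] hnot
  simpa [PySem.Chars.split₀] using this
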